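-- pv_equiv track=rewrite | github.com/eliottcassidy2000/math | 04-computation/gs_ocf_bridge.py | hamiltonian_paths_with_descents
-- ===== SOURCE A (Python) =====
-- from itertools import permutations, combinations
--
-- def hamiltonian_paths_with_descents(A, n):
--     """Return list of (path, descent_count) for all Hamiltonian paths."""
--     results = []
--     for perm in permutations(range(n)):
--         valid = True
--         for i in range(n-1):
--             if A[perm[i]][perm[i+1]] != 1:
--                 valid = False
--                 break
--         if valid:
--             desc = sum(1 for i in range(n-1) if perm[i] > perm[i+1])
--             results.append((perm, desc))
--     return results
-- ===== SOURCE B (Python) =====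
-- def hamiltonian_paths_with_descents(A, n):
--     """Backtracking DFS: extend paths vertex by vertex in increasing order,
--     pruning a branch as soon as an edge is missing (instead of testing all n! permutations)."""
--     if n <= 0:
--         return [((), 0)]
--     verts = list(range(n))
--     results = []
--
--     def dfs(path, remaining, desc):
--         if not remaining:
--             results.append((tuple(path), desc))
--             return
--         u = path[-1]
--         for v in remaining:
--             if A[u][v] == 1:
--                 dfs(path + [v], [w for w in remaining if w != v], desc + (1 if u > v else 0))
--
--     for s in verts:
--         dfs([s], [w for w in verts if w != s], 0)
--     return results
-- ===== Notes on version B (the rewrite author's own statement) =====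
-- stated objective: alternative
-- what changed: Replaced the scan of all n! permutations with a backtracking DFS that extends partial paths along edges only (increasing vertex order), pruning a branch as soon as an edge is missing and accumulating the descent count incrementally.
import Mathlib
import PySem

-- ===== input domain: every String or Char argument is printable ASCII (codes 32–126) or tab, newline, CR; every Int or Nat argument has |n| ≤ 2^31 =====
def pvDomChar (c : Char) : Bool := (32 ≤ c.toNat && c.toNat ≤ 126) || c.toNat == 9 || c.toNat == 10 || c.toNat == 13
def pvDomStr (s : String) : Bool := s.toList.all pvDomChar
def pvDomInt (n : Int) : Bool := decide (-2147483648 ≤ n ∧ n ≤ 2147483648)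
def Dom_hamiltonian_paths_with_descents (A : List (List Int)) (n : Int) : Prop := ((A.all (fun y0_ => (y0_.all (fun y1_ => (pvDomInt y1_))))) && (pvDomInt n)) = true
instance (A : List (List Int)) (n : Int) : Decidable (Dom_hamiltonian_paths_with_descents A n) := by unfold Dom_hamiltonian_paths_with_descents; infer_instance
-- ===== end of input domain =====

-- B replaces A's scan of all n! permutations by an edge-pruned backtracking DFS
-- producing the same results in the same order (a non-edge cuts the whole branch).

-- ===== PORT A =====

-- A[j][k]; total stand-in, exact whenever the index pair is in range (guaranteed by Pre_)
def pvEntry (A : List (List Int)) (j k : Int) : Int :=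
  PySem.List.pyGetD (PySem.List.pyGetD A j []) k 0

-- port of itertools.permutations; exact for duplicate-free input (A only applies it to range(n))
def pvPerms : Nat → List Int → List (List Int)
  | _, [] => [[]]
  | 0, _ :: _ => []
  | fuel+1, x :: xs =>
      (x :: xs).flatMap (fun v => (pvPerms fuel ((x :: xs).filter (fun w => w ≠ v))).map (fun q => v :: q))

def hamiltonian_paths_with_descents (A : List (List Int)) (n : Int) : List (List Int × Int) :=
  let rng := PySem.List.pyRange 0 n 1
  (pvPerms rng.length rng).foldl (fun results perm =>
    let valid := (PySem.List.pyRange 0 (n-1) 1).all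
      (fun i => pvEntry A (PySem.List.pyGetD perm i 0) (PySem.List.pyGetD perm (i+1) 0) == 1)
    if valid then
      results ++ [(perm,
        (PySem.List.pyRange 0 (n-1) 1).foldl
          (fun acc i => acc + (if PySem.List.pyGetD perm i 0 > PySem.List.pyGetD perm (i+1) 0 then (1:Int) else 0)) 0)]
    else results) []

-- ===== PORT B =====

-- depth-first extension of a partial path; fuel = remaining.length at every call (totality guard only)
def pvDfs (A : List (List Int)) : Nat → List Int → List Int → Int → List (List Int × Int) → List (List Int × Int)
  | fuel, path, rem, desc, res =>
    match rem with
    | [] => res ++ [(path, desc)]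
    | _ :: _ =>
      match fuel with
      | 0 => res
      | fuel+1 =>
        let u := PySem.List.pyGetD path (-1) 0
        rem.foldl (fun r v =>
          if pvEntry A u v == 1 then
            pvDfs A fuel (path ++ [v]) (rem.filter (fun w => w ≠ v)) (desc + (if u > v then (1:Int) else 0)) r
          else r) res
  termination_by fuel _ _ _ _ => fuel

def hamiltonian_paths_with_descents_alt (A : List (List Int)) (n : Int) : List (List Int × Int) :=
  if n ≤ 0 then [([], 0)]
  else
    let verts := PySem.List.pyRange 0 n 1
    verts.foldl (fun res s =>
      let rem := verts.filter (fun w => w ≠ s)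
      pvDfs A rem.length [s] rem 0 res) []

-- ===== PRECONDITION & SPEC =====
-- Pre_ excludes exactly the inputs on which A raises an IndexError: for n ≥ 2 every ordered
-- pair (j,k), j ≠ k < n, is accessed as A[j][k] (each pair heads some permutation), so A
-- returns iff the matrix has n rows and row j has length ≥ n (≥ n-1 for the last row);
-- for n ≤ 1 A never indexes. No input on which A returns is excluded.
def Pre_hamiltonian_paths_with_descents (A : List (List Int)) (n : Int) : Prop :=
  n ≤ 1 ∨ (n ≤ (A.length : Int) ∧ ∀ j ∈ List.range n.toNat,
    (if (j : Int) = n - 1 then n - 1 else n) ≤ ((A.getD j []).length : Int))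
instance (A : List (List Int)) (n : Int) : Decidable (Pre_hamiltonian_paths_with_descents A n) := by
  unfold Pre_hamiltonian_paths_with_descents; infer_instance

def pvWitness_hamiltonian_paths_with_descents : List (List Int) × Int := ([[0, 1], [1, 0]], 2)

def Spec_hamiltonian_paths_with_descents (A : List (List Int)) (n : Int) (out : List (List Int × Int)) : Prop := out = hamiltonian_paths_with_descents_alt A n
instance (A : List (List Int)) (n : Int) (out : List (List Int × Int)) : Decidable (Spec_hamiltonian_paths_with_descents A n out) := by unfold Spec_hamiltonian_paths_with_descents; infer_instance

-- ===== CLAIM (what is proved, stated in full; the proofs are below) =====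
def Claim_equal_hamiltonian_paths_with_descents : Prop := ∀ (A : List (List Int)) (n : Int), Dom_hamiltonian_paths_with_descents A n → Pre_hamiltonian_paths_with_descents A n → Spec_hamiltonian_paths_with_descents A n (hamiltonian_paths_with_descents A n)

-- ===== LEMMAS AND PROOFS =====

-- edge test along consecutive pairs of a path
def pvAdjAll (f : Int → Int → Bool) : List Int → Bool
  | x :: y :: t => f x y && pvAdjAll f (y :: t)
  | _ => true

-- accumulation along consecutive pairs of a path
def pvAdjSum (g : Int → Int → Int) : List Int → Int
  | x :: y :: t => g x y + pvAdjSum g (y :: t)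
  | _ => 0

lemma pvAll_range_adj (f : Int → Int → Bool) : ∀ (xs : List Int),
    ((List.range (xs.length - 1)).all fun k => f (xs.getD k 0) (xs.getD (k+1) 0)) = pvAdjAll f xs
  | [] => by simp [pvAdjAll]
  | [x] => by simp [pvAdjAll]
  | x :: y :: t => by
    have ih := pvAll_range_adj f (y :: t)
    simp only [List.length_cons, Nat.add_sub_cancel] at ih ⊢
    rw [List.range_succ_eq_map, List.all_cons, List.all_map]
    simp only [Function.comp_def, Nat.succ_eq_add_one, List.getD_cons_succ, List.getD_cons_zero] at ih ⊢
    rw [ih]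
    simp [pvAdjAll]

lemma pvSum_range_adj (g : Int → Int → Int) : ∀ (xs : List Int) (c : Int),
    ((List.range (xs.length - 1)).foldl (fun acc k => acc + g (xs.getD k 0) (xs.getD (k+1) 0)) c) =
      c + pvAdjSum g xs
  | [], c => by simp [pvAdjSum]
  | [x], c => by simp [pvAdjSum]
  | x :: y :: t, c => by
    have ih := pvSum_range_adj g (y :: t) (c + g x y)
    simp only [List.length_cons, Nat.add_sub_cancel] at ih ⊢
    rw [List.range_succ_eq_map, List.foldl_cons, List.foldl_map]
    simp only [Nat.succ_eq_add_one, List.getD_cons_succ, List.getD_cons_zero] at ih ⊢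
    rw [ih]
    simp [pvAdjSum, add_assoc]

-- removing one occurrence from a duplicate-free list by filtering
lemma pvFilter_ne_length {l : List Int} {v : Int} (hnd : l.Nodup) (hv : v ∈ l) :
    (l.filter (fun w => w ≠ v)).length = l.length - 1 := by
  have h := List.Nodup.erase_eq_filter hnd v
  have : (l.filter (fun x => x != v)).length = l.length - 1 := by
    rw [← h]; exact List.length_erase_of_mem hv
  simpa [bne] using this

lemma pvPerms_mem_length : ∀ (fuel : Nat) (l : List Int), l.Nodup → fuel = l.length →
    ∀ q ∈ pvPerms fuel l, q.length = fuel := by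
  intro fuel
  induction fuel with
  | zero =>
    intro l _ hlen q hq
    match l, hlen with
    | [], _ => simp [pvPerms] at hq; simp [hq]
  | succ k ih =>
    intro l hnd hlen q hq
    match l, hlen with
    | x :: xs, hlen =>
      simp only [pvPerms, List.mem_flatMap, List.mem_map] at hq
      obtain ⟨v, hv, q', hq', rfl⟩ := hq
      have hflen : ((x :: xs).filter (fun w => w ≠ v)).length = k := by
        have := pvFilter_ne_length hnd hv
        simp only [List.length_cons] at this hlen ⊢
        omega
      have := ih ((x :: xs).filter (fun w => w ≠ v)) (List.Nodup.filter _ hnd) hflen.symm q' hq'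
      simp [this]

-- a fold whose step appends a block per element is a flatMap
lemma pvFoldl_block {α β : Type} : ∀ (l : List α) (res : List β) (f : List β → α → List β) (g : α → List β),
    (∀ (acc : List β), ∀ v ∈ l, f acc v = acc ++ g v) → l.foldl f res = res ++ l.flatMap g := by
  intro l
  induction l with
  | nil => intro res f g _; simp
  | cons x xs ih =>
    intro res f g h
    rw [List.foldl_cons, h res x (by simp), ih _ f g (fun acc v hv => h acc v (by simp [hv]))]
    simp

lemma pvFlatMap_congr {α β : Type} {l : List α} {f g : α → List β}
    (h : ∀ x ∈ l, f x = g x) : l.flatMap f = l.flatMap g := by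
  induction l with
  | nil => rfl
  | cons x xs ih =>
    simp only [List.flatMap_cons]
    rw [h x (by simp), ih (fun v hv => h v (by simp [hv]))]

-- the DFS from `path`, with `rem` the unused vertices, appends exactly the valid completions
lemma pvDfs_eq (A : List (List Int)) : ∀ (fuel : Nat) (rem : List Int), rem.Nodup → fuel = rem.length →
    ∀ (path : List Int) (desc : Int) (res : List (List Int × Int)),
    pvDfs A fuel path rem desc res = res ++ (pvPerms fuel rem).flatMap (fun q =>
      if pvAdjAll (fun a b => pvEntry A a b == 1) (PySem.List.pyGetD path (-1) 0 :: q) then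
        [(path ++ q, desc + pvAdjSum (fun a b => if a > b then (1:Int) else 0) (PySem.List.pyGetD path (-1) 0 :: q))]
      else []) := by
  intro fuel
  induction fuel with
  | zero =>
    intro rem hnd hlen path desc res
    match rem, hlen with
    | [], _ => simp [pvDfs, pvPerms, pvAdjAll, pvAdjSum]
  | succ k ih =>
    intro rem hnd hlen path desc res
    match rem, hlen with
    | r :: rs, hlen =>
      rw [pvDfs]
      have hstep : ∀ (acc : List (List Int × Int)), ∀ v ∈ r :: rs,
          (if pvEntry A (PySem.List.pyGetD path (-1) 0) v == 1 then
            pvDfs A k (path ++ [v]) ((r :: rs).filter (fun w => w ≠ v))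
              (desc + (if PySem.List.pyGetD path (-1) 0 > v then (1:Int) else 0)) acc
          else acc) =
          acc ++ (if pvEntry A (PySem.List.pyGetD path (-1) 0) v == 1 then
            (pvPerms k ((r :: rs).filter (fun w => w ≠ v))).flatMap (fun q =>
              if pvAdjAll (fun a b => pvEntry A a b == 1) (v :: q) then
                [((path ++ [v]) ++ q, (desc + (if PySem.List.pyGetD path (-1) 0 > v then (1:Int) else 0)) + pvAdjSum (fun a b => if a > b then (1:Int) else 0) (v :: q))]
              else [])
          else []) := by
        intro acc v hv
        by_cases he : pvEntry A (PySem.List.pyGetD path (-1) 0) v == 1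
        · simp only [he, if_pos]
          have hflen : k = ((r :: rs).filter (fun w => w ≠ v)).length := by
            have := pvFilter_ne_length hnd hv
            simp only [List.length_cons] at this hlen ⊢
            omega
          rw [ih _ (List.Nodup.filter _ hnd) hflen]
          rw [PySem.List.pyGetD_neg_one_append_singleton]
        · simp [he]
      rw [pvFoldl_block _ _ _ _ hstep]
      congr 1
      rw [pvPerms, List.flatMap_assoc]
      apply pvFlatMap_congr
      intro v hv
      rw [List.flatMap_map]
      by_cases he : pvEntry A (PySem.List.pyGetD path (-1) 0) v == 1
      · simp only [he, if_pos]
        apply pvFlatMap_congr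
        intro q hq
        simp only [pvAdjAll, pvAdjSum, he, Bool.true_and]
        by_cases hok : pvAdjAll (fun a b => pvEntry A a b == 1) (v :: q)
        · simp [hok, add_assoc]
        · simp [hok]
      · simp only [he, if_neg, Bool.false_eq_true, not_false_iff]
        simp [pvAdjAll, he]

-- index-based adjacent-pair test over range(n-1) equals the structural one (xs of length n)
lemma pvAll_pyrange_adj (f : Int → Int → Bool) (n : Int) (xs : List Int) (h : xs.length = n.toNat) :
    ((PySem.List.pyRange 0 (n-1) 1).all fun i =>
        f (PySem.List.pyGetD xs i 0) (PySem.List.pyGetD xs (i+1) 0)) = pvAdjAll f xs := by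
  rw [PySem.List.pyRange_one, List.all_map]
  have h1 : (n - 1 - 0).toNat = xs.length - 1 := by omega
  rw [h1]
  have e1 : ∀ (k : Nat), ((k : Int) + 1) = ((k + 1 : Nat) : Int) := by intro k; push_cast; ring
  simp only [Function.comp_def, zero_add, e1, PySem.List.pyGetD_natCast]
  exact pvAll_range_adj f xs

lemma pvSum_pyrange_adj (g : Int → Int → Int) (n : Int) (xs : List Int) (h : xs.length = n.toNat) :
    ((PySem.List.pyRange 0 (n-1) 1).foldl (fun acc i =>
        acc + g (PySem.List.pyGetD xs i 0) (PySem.List.pyGetD xs (i+1) 0)) 0) = pvAdjSum g xs := by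
  rw [PySem.List.pyRange_one, List.foldl_map]
  have h1 : (n - 1 - 0).toNat = xs.length - 1 := by omega
  rw [h1]
  have e1 : ∀ (k : Nat), ((k : Int) + 1) = ((k + 1 : Nat) : Int) := by intro k; push_cast; ring
  simp only [zero_add, e1, PySem.List.pyGetD_natCast]
  rw [pvSum_range_adj g xs 0, zero_add]

-- the permutation-filter form equals the per-start-vertex decomposition
lemma pvMain (f : Int → Int → Bool) (g : Int → Int → Int) (l : List Int)
    (hnd : l.Nodup) (hne : l ≠ []) :
    (pvPerms l.length l).flatMap (fun q =>
        if pvAdjAll f q then [(q, pvAdjSum g q)] else []) =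
      l.flatMap (fun s =>
        (pvPerms ((l.filter (fun w => w ≠ s)).length) (l.filter (fun w => w ≠ s))).flatMap (fun q =>
          if pvAdjAll f (s :: q) then [([s] ++ q, 0 + pvAdjSum g (s :: q))] else [])) := by
  match l, hne with
  | r :: rs, _ =>
    simp only [List.length_cons]
    rw [pvPerms, List.flatMap_assoc]
    apply pvFlatMap_congr
    intro s hs
    rw [List.flatMap_map]
    have hlen : ((r :: rs).filter (fun w => w ≠ s)).length = rs.length := by
      have := pvFilter_ne_length hnd hs
      simp only [List.length_cons] at this
      omega
    rw [hlen]
    apply pvFlatMap_congr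
    intro q hq
    simp [zero_add]

-- ===== VERDICT (by name: the statement is the Claim_ definition above) =====
theorem hamiltonian_paths_with_descents_spec : Claim_equal_hamiltonian_paths_with_descents := by
  intro A n _ _
  unfold Spec_hamiltonian_paths_with_descents
  unfold hamiltonian_paths_with_descents hamiltonian_paths_with_descents_alt
  by_cases hn : n ≤ 0
  · rw [PySem.List.pyRange_one_eq_nil hn, PySem.List.pyRange_one_eq_nil (show n - 1 ≤ 0 by omega)]
    simp [pvPerms, hn]
  · simp only [if_neg (show ¬ n ≤ 0 by omega)]
    have hnd : (PySem.List.pyRange 0 n 1).Nodup := PySem.List.nodup_pyRange_one 0 n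
    have hRlen : (PySem.List.pyRange 0 n 1).length = n.toNat := by
      rw [PySem.List.length_pyRange_one]; omega
    have hne : PySem.List.pyRange 0 n 1 ≠ [] := by
      intro hc
      have := congrArg List.length hc
      rw [hRlen] at this
      simp at this
      omega
    have h1 : ∀ (acc : List (List Int × Int)), ∀ perm ∈ pvPerms (PySem.List.pyRange 0 n 1).length (PySem.List.pyRange 0 n 1),
        (if (PySem.List.pyRange 0 (n-1) 1).all
            (fun i => pvEntry A (PySem.List.pyGetD perm i 0) (PySem.List.pyGetD perm (i+1) 0) == 1) then
          acc ++ [(perm,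
            (PySem.List.pyRange 0 (n-1) 1).foldl
              (fun a i => a + (if PySem.List.pyGetD perm i 0 > PySem.List.pyGetD perm (i+1) 0 then (1:Int) else 0)) 0)]
        else acc) =
        acc ++ (if pvAdjAll (fun a b => pvEntry A a b == 1) perm then
          [(perm, pvAdjSum (fun a b => if a > b then (1:Int) else 0) perm)] else []) := by
      intro acc perm hperm
      have hplen : perm.length = n.toNat := by
        rw [pvPerms_mem_length (PySem.List.pyRange 0 n 1).length (PySem.List.pyRange 0 n 1) hnd rfl perm hperm]
        exact hRlen
      rw [pvAll_pyrange_adj (fun a b => pvEntry A a b == 1) n perm hplen,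
          pvSum_pyrange_adj (fun a b => if a > b then (1:Int) else 0) n perm hplen]
      by_cases hk : pvAdjAll (fun a b => pvEntry A a b == 1) perm
      · simp [hk]
      · simp [hk]
    have h2 : ∀ (acc : List (List Int × Int)), ∀ s ∈ PySem.List.pyRange 0 n 1,
        pvDfs A ((PySem.List.pyRange 0 n 1).filter (fun w => w ≠ s)).length [s]
            ((PySem.List.pyRange 0 n 1).filter (fun w => w ≠ s)) 0 acc =
        acc ++ (pvPerms ((PySem.List.pyRange 0 n 1).filter (fun w => w ≠ s)).length
            ((PySem.List.pyRange 0 n 1).filter (fun w => w ≠ s))).flatMap (fun q =>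
          if pvAdjAll (fun a b => pvEntry A a b == 1) (s :: q) then
            [([s] ++ q, 0 + pvAdjSum (fun a b => if a > b then (1:Int) else 0) (s :: q))]
          else []) := by
      intro acc s _
      have hgl : PySem.List.pyGetD [s] (-1) 0 = s := by
        simpa using PySem.List.pyGetD_neg_one_append_singleton (xs := ([] : List Int)) (x := s) (d := 0)
      rw [pvDfs_eq A _ _ (List.Nodup.filter _ hnd) rfl [s] 0 acc]
      rw [hgl]
    rw [pvFoldl_block _ _ _ _ h1, pvFoldl_block _ _ _ _ h2]
    simp only [List.nil_append]
    exact pvMain (fun a b => pvEntry A a b == 1) (fun a b => if a > b then (1:Int) else 0)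
      (PySem.List.pyRange 0 n 1) hnd hne
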